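-- pv_equiv track=rewrite | github.com/tsweedie/span_assessment | scores.py | print_scoreboard
-- ===== SOURCE A (Python) =====
-- def print_scoreboard(score_board: dict) -> str:
--     """
--         Formats a dictionary with scores for teams into a ranked scored board string.
--         The scores are ranked highest to lowest with a secondary ordering by team
--         name where the scores are the same.
--     """
--
--     inverted_score_board = {}
--     for team, score in score_board.items():
--         if inverted_score_board.get(score) is not None:
--             inverted_score_board[score].append(team)
--         else:
--             inverted_score_board[score] = [team]
--
--     sorted_scores = sorted(inverted_score_board, reverse=True)
--
--     scores_str = ''
--     rank = 1
--     for score in sorted_scores: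
--         teams = inverted_score_board[score]
--
--         if len(teams) == 1:
--             if score == 1:
--                 scores_str += '%s. %s, %s pt \n' % (rank, teams[0], score)
--             else:
--                 scores_str += '%s. %s, %s pts \n' % (rank, teams[0], score)
--         else:
--             teams.sort()
--             for team in teams:
--                 if score == 1:
--                     scores_str += '%s. %s, %s pt \n' % (rank, team, score)
--                 else:
--                     scores_str += '%s. %s, %s pts \n' % (rank, team, score)
--
--         rank += 1
--
--     return scores_str.strip()
-- ===== SOURCE B (Python) =====
-- def print_scoreboard(score_board: dict) -> str:
--     items = sorted(score_board.items(), key=lambda kv: (-kv[1], kv[0]))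
--     out = []
--     rank = 0
--     prev = None
--     for team, score in items:
--         if prev is None or score != prev:
--             rank += 1
--             prev = score
--         out.append('%s. %s, %s %s \n' % (rank, team, score, 'pt' if score == 1 else 'pts'))
--     return ''.join(out).strip()
-- ===== Notes on version B (the rewrite author's own statement) =====
-- stated objective: simpler
-- what changed: Replaces A's score-keyed grouping dict plus per-group sorting and group-index ranks by one sort of the items under the key (-score, name) followed by a single linear scan that assigns dense ranks by comparing each score with the previous one.
import Mathlib
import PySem

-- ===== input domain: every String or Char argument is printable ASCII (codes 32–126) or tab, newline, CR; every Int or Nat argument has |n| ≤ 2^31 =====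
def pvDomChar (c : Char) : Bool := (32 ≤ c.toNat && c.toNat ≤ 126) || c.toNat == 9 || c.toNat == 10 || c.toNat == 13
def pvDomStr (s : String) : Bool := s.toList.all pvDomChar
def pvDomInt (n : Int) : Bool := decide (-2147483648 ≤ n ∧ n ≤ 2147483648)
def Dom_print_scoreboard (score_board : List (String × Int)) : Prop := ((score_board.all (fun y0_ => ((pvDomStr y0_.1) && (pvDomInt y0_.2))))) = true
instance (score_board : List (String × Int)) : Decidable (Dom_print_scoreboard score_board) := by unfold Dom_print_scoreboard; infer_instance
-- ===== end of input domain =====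

-- B replaces A's score-keyed grouping dict (plus per-group sort and group-index ranks) by a single
-- sort under the key (-score, name) and one linear scan assigning dense ranks — simpler, same cost.
-- (A's `teams.sort()` mutates lists held in A's own local dict only; neither program mutates its argument.)

-- ===== PORT A =====
def pvLineA (rank : Int) (team : String) (score : Int) : String :=
  if score == 1 then
    PySem.Int.toStr rank ++ ". " ++ team ++ ", " ++ PySem.Int.toStr score ++ " pt \n"
  else
    PySem.Int.toStr rank ++ ". " ++ team ++ ", " ++ PySem.Int.toStr score ++ " pts \n"

def print_scoreboard (score_board : List (String × Int)) : String :=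
  let inverted : PySem.Dict Int (List String) :=
    score_board.foldl (fun d p =>
      match d.get? p.2 with
      | some ts => d.insert p.2 (ts ++ [p.1])
      | none => d.insert p.2 [p.1]) PySem.Dict.empty
  let sorted_scores := PySem.List.sorted inverted.keys (fun x => x) true
  let res := sorted_scores.foldl (fun (st : String × Int) score =>
    let teams := inverted.getD score []
    let s' :=
      if PySem.List.len teams == 1 then
        st.1 ++ pvLineA st.2 (PySem.List.pyGetD teams 0 "") score
      else
        (PySem.List.sorted teams (fun t => t)).foldl
          (fun acc team => acc ++ pvLineA st.2 team score) st.1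
    (s', st.2 + 1)) ("", 1)
  PySem.Str.strip res.1

-- ===== PORT B =====
def pvLineB (rank : Int) (team : String) (score : Int) : String :=
  PySem.Int.toStr rank ++ ". " ++ team ++ ", " ++ PySem.Int.toStr score ++ " " ++
    (if score == 1 then "pt" else "pts") ++ " \n"

def print_scoreboard_alt (score_board : List (String × Int)) : String :=
  let items := PySem.List.sorted score_board (fun kv => toLex (-kv.2, kv.1))
  let res := items.foldl (fun (st : List String × Int × Option Int) kv =>
    let rp : Int × Option Int :=
      match st.2.2 with
      | none => (st.2.1 + 1, some kv.2)
      | some p => if kv.2 ≠ p then (st.2.1 + 1, some kv.2) else (st.2.1, some p)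
    (st.1 ++ [pvLineB rp.1 kv.1 kv.2], rp)) ([], 0, none)
  PySem.Str.strip (PySem.Str.join "" res.1)

-- ===== PRECONDITION & SPEC =====
def Spec_print_scoreboard (score_board : List (String × Int)) (out : String) : Prop := out = print_scoreboard_alt score_board
instance (score_board : List (String × Int)) (out : String) : Decidable (Spec_print_scoreboard score_board out) := by unfold Spec_print_scoreboard; infer_instance

-- ===== CLAIM (what is proved, stated in full; the proofs are below) =====
def Claim_equal_print_scoreboard : Prop := ∀ (score_board : List (String × Int)), Dom_print_scoreboard score_board → Spec_print_scoreboard score_board (print_scoreboard score_board)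

-- ===== LEMMAS AND PROOFS =====

-- the team names carrying score s, in input order
def pvNames (xs : List (String × Int)) (s : Int) : List String :=
  (xs.filter (fun p => p.2 == s)).map (·.1)

-- those names sorted ascending
def pvSN (xs : List (String × Int)) (s : Int) : List String :=
  PySem.List.sorted (pvNames xs s) (fun t => t)

-- the (team, score) pairs of one score group, names in ascending order
def pvBlock (xs : List (String × Int)) (s : Int) : List (String × Int) :=
  (pvSN xs s).map (fun t => (t, s))

-- the output lines for the given scores, first one carrying rank r
def pvLinesOf (xs : List (String × Int)) : List Int → Int → List String
  | [], _ => []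
  | s :: ss, r => (pvSN xs s).map (fun t => pvLineB r t s) ++ pvLinesOf xs ss (r + 1)

-- A's grouping dict
def pvInv (xs : List (String × Int)) : PySem.Dict Int (List String) :=
  xs.foldl (fun d p =>
      match d.get? p.2 with
      | some ts => d.insert p.2 (ts ++ [p.1])
      | none => d.insert p.2 [p.1]) PySem.Dict.empty

def pvConcat (ls : List String) : String := ls.foldr (· ++ ·) ""

def pvKey (kv : String × Int) : Lex (Int × String) := toLex (-kv.2, kv.1)

-- A's loop body (definitionally the fold step of port A)
def pvStepA (xs : List (String × Int)) (st : String × Int) (score : Int) : String × Int :=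
  let teams := (pvInv xs).getD score []
  let s' :=
    if PySem.List.len teams == 1 then
      st.1 ++ pvLineA st.2 (PySem.List.pyGetD teams 0 "") score
    else
      (PySem.List.sorted teams (fun t => t)).foldl
        (fun acc team => acc ++ pvLineA st.2 team score) st.1
  (s', st.2 + 1)

-- B's loop body (definitionally the fold step of port B)
def pvStepB (st : List String × Int × Option Int) (kv : String × Int) :
    List String × Int × Option Int :=
  let rp : Int × Option Int :=
    match st.2.2 with
    | none => (st.2.1 + 1, some kv.2)
    | some p => if kv.2 ≠ p then (st.2.1 + 1, some kv.2) else (st.2.1, some p)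
  (st.1 ++ [pvLineB rp.1 kv.1 kv.2], rp)

theorem pvLineA_eq (r : Int) (t : String) (s : Int) : pvLineA r t s = pvLineB r t s := by
  unfold pvLineA pvLineB
  by_cases h : s == 1 <;> simp [h, String.append_assoc]

-- ---- A's grouping dict, characterised ----

theorem pvStep_eq (d : PySem.Dict Int (List String)) (p : String × Int) :
    (match d.get? p.2 with
      | some ts => d.insert p.2 (ts ++ [p.1])
      | none => d.insert p.2 [p.1]) = d.modify p.2 [] (fun ts => ts ++ [p.1]) := by
  unfold PySem.Dict.modify
  cases h : d.get? p.2 <;> simp [PySem.Dict.getD_eq_get?_getD, h]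

theorem pvInv_eq (xs : List (String × Int)) :
    pvInv xs = xs.foldl (fun d p => d.modify p.2 [] (fun ts => ts ++ [p.1])) PySem.Dict.empty := by
  unfold pvInv; simp only [pvStep_eq]

theorem pvInv_getD (xs : List (String × Int)) (s : Int) :
    (pvInv xs).getD s [] = pvNames xs s := by
  rw [pvInv_eq]
  have h1 : xs.foldl (fun d p => d.modify p.2 [] (fun ts => ts ++ [p.1])) PySem.Dict.empty
      = (xs.map (fun p => (p.2, p.1))).foldl (fun d q => d.modify q.1 [] (fun ts => ts ++ [q.2])) PySem.Dict.empty := by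
    rw [List.foldl_map]
  rw [h1, PySem.Dict.getD_foldl_modify_append]
  simp [pvNames, List.filter_map, Function.comp_def]

theorem pvInv_keys (xs : List (String × Int)) :
    (pvInv xs).keys = PySem.Set.ofList (xs.map (·.2)) := by
  rw [pvInv_eq]
  have := PySem.Dict.keys_foldl_modify_key xs (fun p => p.2) ([] : List String)
      (fun _ p => (fun ts => ts ++ [p.1])) PySem.Dict.empty
  simpa [PySem.Set.update_nil_left] using this

-- ---- string concatenation toolkit ----

theorem pvConcat_append (l1 l2 : List String) :
    pvConcat (l1 ++ l2) = pvConcat l1 ++ pvConcat l2 := by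
  induction l1 with
  | nil => simp [pvConcat, String.empty_append]
  | cons a t ih => simp [pvConcat, String.append_assoc] at ih ⊢; rw [ih]

theorem pvStrFold (ts : List String) (f : String → String) :
    ∀ a : String, ts.foldl (fun acc t => acc ++ f t) a = a ++ pvConcat (ts.map f) := by
  induction ts with
  | nil => intro a; simp [pvConcat, String.append_empty]
  | cons t ts ih =>
    intro a
    simp only [List.foldl_cons, List.map_cons]
    rw [ih]
    show _ = a ++ pvConcat (f t :: ts.map f)
    have : pvConcat (f t :: ts.map f) = f t ++ pvConcat (ts.map f) := rfl
    rw [this, ← String.append_assoc]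

theorem pvConcat_toList (ls : List String) :
    (pvConcat ls).toList = (ls.map String.toList).flatten := by
  induction ls with
  | nil => rfl
  | cons a t ih => simp [pvConcat, String.toList_append] at ih ⊢; rw [ih]

theorem pvJoinNilChars (parts : List (List Char)) :
    PySem.Chars.join [] parts = parts.flatten := by
  induction parts with
  | nil => simp [PySem.Chars.join_nil]
  | cons p rest ih =>
    cases rest with
    | nil => simp [PySem.Chars.join_singleton]
    | cons q rest' =>
      rw [PySem.Chars.join_cons_cons]
      simp only [List.flatten_cons] at ih ⊢
      rw [ih]
      simp

theorem pvJoinEmpty (ls : List String) : PySem.Str.join "" ls = pvConcat ls := by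
  apply String.toList_inj.mp
  rw [pvConcat_toList]
  show (String.ofList (PySem.Chars.join ("".toList) (ls.map String.toList))).toList = _
  rw [String.toList_ofList]
  have : ("" : String).toList = [] := rfl
  rw [this, pvJoinNilChars]

-- ---- A's render loop produces the canonical lines ----

theorem pvStepA_norm (xs : List (String × Int)) (st : String × Int) (s : Int) :
    pvStepA xs st s = (st.1 ++ pvConcat ((pvSN xs s).map (fun t => pvLineB st.2 t s)), st.2 + 1) := by
  unfold pvStepA
  rw [pvInv_getD]
  simp only [PySem.List.len_eq, beq_iff_eq]
  by_cases h : ((pvNames xs s).length : Int) = 1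
  · have h' : (pvNames xs s).length = 1 := by exact_mod_cast h
    obtain ⟨t, ht⟩ := List.length_eq_one_iff.mp h'
    have hsn : pvSN xs s = [t] := by unfold pvSN; rw [ht]; rfl
    rw [if_pos h, ht, hsn]
    simp [PySem.List.pyGetD_zero_cons, pvConcat, String.append_empty, pvLineA_eq]
  · rw [if_neg h]
    rw [show (PySem.List.sorted (pvNames xs s) (fun t => t)) = pvSN xs s from rfl]
    rw [pvStrFold]
    simp only [pvLineA_eq]

theorem pvAFold (xs : List (String × Int)) :
    ∀ (ss : List Int) (acc : String) (r : Int),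
    (ss.foldl (pvStepA xs) (acc, r)).1 = acc ++ pvConcat (pvLinesOf xs ss r) := by
  intro ss
  induction ss with
  | nil => intro acc r; simp [pvLinesOf, pvConcat, String.append_empty]
  | cons s ss ih =>
    intro acc r
    rw [List.foldl_cons, pvStepA_norm, ih]
    show _ = acc ++ pvConcat ((pvSN xs s).map (fun t => pvLineB r t s) ++ pvLinesOf xs ss (r + 1))
    rw [pvConcat_append, String.append_assoc]

-- ---- the single sort of B equals the concatenation of A's groups ----

theorem pvBlock_perm (xs : List (String × Int)) (s : Int) :
    (pvBlock xs s).Perm (xs.filter (fun p => p.2 == s)) := by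
  unfold pvBlock pvSN
  have h1 : (PySem.List.sorted (pvNames xs s) (fun t => t)).Perm (pvNames xs s) :=
    PySem.List.sorted_perm _ _ _
  refine (h1.map _).trans ?_
  unfold pvNames
  rw [List.map_map]
  have : ∀ p ∈ xs.filter (fun p => p.2 == s), ((fun t => (t, s)) ∘ (·.1)) p = p := by
    intro p hp
    have := List.of_mem_filter hp
    simp only [beq_iff_eq] at this
    simp [Function.comp, ← this]
  rw [List.map_congr_left this]
  simp

theorem pvPartition_perm : ∀ (ss : List Int) (xs : List (String × Int)), ss.Nodup →
    (∀ p ∈ xs, p.2 ∈ ss) → ((ss.map (pvBlock xs)).flatten).Perm xs := by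
  intro ss
  induction ss with
  | nil =>
    intro xs _ h
    have : xs = [] := by
      cases xs with
      | nil => rfl
      | cons p t => exact absurd (h p (by simp)) (by simp)
    simp [this]
  | cons s ss ih =>
    intro xs hnd h
    have hns : s ∉ ss := (List.nodup_cons.mp hnd).1
    have hnd' := (List.nodup_cons.mp hnd).2
    simp only [List.map_cons, List.flatten_cons]
    have htail : ss.map (pvBlock xs) = ss.map (pvBlock (xs.filter (fun p => !(p.2 == s)))) := by
      apply List.map_congr_left
      intro s' hs'
      have hne : s' ≠ s := by rintro rfl; exact hns hs'
      unfold pvBlock pvSN pvNames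
      have hf : xs.filter (fun p => p.2 == s')
          = (xs.filter (fun p => !(p.2 == s))).filter (fun p => p.2 == s') := by
        rw [List.filter_filter]
        apply List.filter_congr
        intro p _
        by_cases hp : p.2 = s' <;> simp [hp, hne]
      rw [hf]
    rw [htail]
    have hperm2 : ((ss.map (pvBlock (xs.filter (fun p => !(p.2 == s))))).flatten).Perm
        (xs.filter (fun p => !(p.2 == s))) := by
      apply ih _ hnd'
      intro p hp
      have h1 := List.of_mem_filter hp
      have h2 := h p (List.mem_of_mem_filter hp)
      simp at h1
      simp only [List.mem_cons] at h2
      rcases h2 with h2 | h2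
      · exact absurd h2 (by simpa using h1)
      · exact h2
    exact ((pvBlock_perm xs s).append hperm2).trans (List.filter_append_perm _ xs)

theorem pvKey_inj : Function.Injective pvKey := by
  intro a b h
  unfold pvKey at h
  rw [toLex_inj] at h
  obtain ⟨h1, h2⟩ := Prod.mk.injEq .. ▸ h
  · exact Prod.ext h2 (by omega)

theorem pvC_pairwise (xs : List (String × Int)) (ss : List Int)
    (hss : ss.Pairwise (· > ·)) :
    ((ss.map (pvBlock xs)).flatten).Pairwise (fun a b => pvKey a ≤ pvKey b) := by
  rw [List.pairwise_flatten]
  constructor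
  · intro l hl
    obtain ⟨s, _, rfl⟩ := List.mem_map.mp hl
    unfold pvBlock
    rw [List.pairwise_map]
    have := PySem.List.sorted_pairwise (pvNames xs s) (fun t => t)
    apply this.imp
    intro a b hab
    unfold pvKey
    rw [Prod.Lex.toLex_le_toLex]
    exact Or.inr ⟨rfl, hab⟩
  · rw [List.pairwise_map]
    apply hss.imp
    intro s s' hss' x hx y hy
    obtain ⟨tx, _, rfl⟩ := List.mem_map.mp hx
    obtain ⟨ty, _, rfl⟩ := List.mem_map.mp hy
    unfold pvKey
    rw [Prod.Lex.toLex_le_toLex]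
    exact Or.inl (by simp; omega)

theorem pvSort_eq_C (xs : List (String × Int)) (ss : List Int)
    (hnd : ss.Nodup) (hmem : ∀ p ∈ xs, p.2 ∈ ss) (hgt : ss.Pairwise (· > ·)) :
    PySem.List.sorted xs pvKey = (ss.map (pvBlock xs)).flatten := by
  apply PySem.List.eq_of_perm_of_pairwise_le_of_injective pvKey pvKey_inj
  · exact (PySem.List.sorted_perm xs pvKey false).trans (pvPartition_perm ss xs hnd hmem).symm
  · exact PySem.List.sorted_pairwise xs pvKey
  · exact pvC_pairwise xs ss hgt

-- ---- B's dense-rank scan produces the canonical lines ----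

theorem pvScanTail (s : Int) : ∀ (ts : List String) (ls : List String) (r : Int),
    (ts.map (fun t => (t, s))).foldl pvStepB (ls, r, some s)
      = (ls ++ ts.map (fun t => pvLineB r t s), r, some s) := by
  intro ts
  induction ts with
  | nil => intro ls r; simp
  | cons t ts ih =>
    intro ls r
    simp only [List.map_cons, List.foldl_cons]
    rw [show pvStepB (ls, r, some s) (t, s) = (ls ++ [pvLineB r t s], r, some s) by
      unfold pvStepB; simp]
    rw [ih]
    simp

theorem pvScanBlock (xs : List (String × Int)) (s : Int) (ls : List String) (r : Int)
    (po : Option Int) (hpo : po ≠ some s) (hne : pvSN xs s ≠ []) :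
    (pvBlock xs s).foldl pvStepB (ls, r, po)
      = (ls ++ (pvSN xs s).map (fun t => pvLineB (r + 1) t s), r + 1, some s) := by
  obtain ⟨t, ts, ht⟩ := List.exists_cons_of_ne_nil hne
  unfold pvBlock
  rw [ht]
  simp only [List.map_cons, List.foldl_cons]
  have hstep : pvStepB (ls, r, po) (t, s) = (ls ++ [pvLineB (r + 1) t s], r + 1, some s) := by
    unfold pvStepB
    cases po with
    | none => simp
    | some q =>
      have : s ≠ q := fun h => hpo (by rw [h])
      simp [this]
  rw [hstep, pvScanTail]
  simp

theorem pvScanMain (xs : List (String × Int)) : ∀ (ss : List Int) (ls : List String)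
    (r : Int) (po : Option Int), ss.Pairwise (· > ·) →
    (∀ s ∈ ss, pvSN xs s ≠ []) →
    (po = none ∨ ∃ q, (∀ s ∈ ss, s < q) ∧ po = some q) →
    ∃ st2, ((ss.map (pvBlock xs)).flatten).foldl pvStepB (ls, r, po)
      = (ls ++ pvLinesOf xs ss (r + 1), st2) := by
  intro ss
  induction ss with
  | nil => intro ls r po _ _ _; exact ⟨(r, po), by simp [pvLinesOf]⟩
  | cons s ss ih =>
    intro ls r po hpw hblk hpo
    simp only [List.map_cons, List.flatten_cons]
    rw [List.foldl_append]
    have hpos : po ≠ some s := by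
      rcases hpo with h | ⟨q, hq, h⟩
      · rw [h]; simp
      · rw [h]; intro hh
        have := hq s (by simp)
        simp only [Option.some.injEq] at hh
        omega
    rw [pvScanBlock xs s ls r po hpos (hblk s (by simp))]
    obtain ⟨st2, hst2⟩ := ih (ls ++ (pvSN xs s).map (fun t => pvLineB (r + 1) t s)) (r + 1) (some s)
      (List.pairwise_cons.mp hpw).2
      (fun s' hs' => hblk s' (by simp [hs']))
      (Or.inr ⟨s, fun s' hs' => (List.pairwise_cons.mp hpw).1 s' hs', rfl⟩)
    refine ⟨st2, ?_⟩
    rw [hst2]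
    show _ = (ls ++ ((pvSN xs s).map (fun t => pvLineB (r + 1) t s) ++ pvLinesOf xs ss (r + 1 + 1)), st2)
    rw [List.append_assoc]

-- ===== VERDICT (by name: the statement is the Claim_ definition above) =====

theorem print_scoreboard_spec : Claim_equal_print_scoreboard := by
  unfold Claim_equal_print_scoreboard Spec_print_scoreboard
  intro xs _
  have hAu : print_scoreboard xs
      = PySem.Str.strip ((PySem.List.sorted (pvInv xs).keys (fun x => x) true).foldl
          (pvStepA xs) ("", 1)).1 := rfl
  have hBu : print_scoreboard_alt xs
      = PySem.Str.strip (PySem.Str.join ""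
          ((PySem.List.sorted xs pvKey).foldl pvStepB ([], 0, none)).1) := rfl
  set ss := PySem.List.sorted (PySem.Set.ofList (xs.map (·.2))) (fun x => x) true with hssdef
  have hperm : ss.Perm (PySem.Set.ofList (xs.map (·.2))) := PySem.List.sorted_perm _ _ _
  have hnd : ss.Nodup := hperm.nodup_iff.mpr (PySem.Set.nodup_ofList _)
  have hgt : ss.Pairwise (· > ·) := by
    have h1 := PySem.List.sorted_pairwise_rev (PySem.Set.ofList (xs.map (·.2))) (fun x => x)
    exact (h1.and hnd).imp (fun h => lt_of_le_of_ne h.1 (Ne.symm h.2))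
  have hmem : ∀ p ∈ xs, p.2 ∈ ss := by
    intro p hp
    rw [hssdef, PySem.List.mem_sorted, PySem.Set.mem_ofList]
    exact List.mem_map_of_mem hp
  have hblk : ∀ s ∈ ss, pvSN xs s ≠ [] := by
    intro s hs
    rw [hssdef, PySem.List.mem_sorted, PySem.Set.mem_ofList] at hs
    obtain ⟨p, hp, hps⟩ := List.mem_map.mp hs
    unfold pvSN
    rw [Ne, PySem.List.sorted_eq_nil_iff]
    unfold pvNames
    simp only [List.map_eq_nil_iff]
    exact List.ne_nil_of_mem (List.mem_filter.mpr ⟨hp, by simp [hps]⟩)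
  -- A side
  rw [hAu, pvInv_keys]
  rw [show PySem.List.sorted (PySem.Set.ofList (xs.map (·.2))) (fun x => x) true = ss from rfl]
  rw [pvAFold]
  rw [String.empty_append]
  -- B side
  rw [hBu, pvSort_eq_C xs ss hnd hmem hgt]
  obtain ⟨st2, hst2⟩ := pvScanMain xs ss [] 0 none hgt hblk (Or.inl rfl)
  rw [hst2]
  show PySem.Str.strip (pvConcat (pvLinesOf xs ss 1))
      = PySem.Str.strip (PySem.Str.join "" ([] ++ pvLinesOf xs ss (0 + 1)))
  rw [pvJoinEmpty, List.nil_append]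
  norm_num
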